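-- pv_equiv track=rewrite | github.com/fsanzl/fonemas | fonemas/fonemas.py | make_rehash
-- ===== SOURCE A (Python) =====
-- def make_rehash(sentence):
--     """
--     Rehash syllables to adjust syllable boundaries based on phonological rules.
--
--     :param sentence: The sentence represented as a list of syllables.
--     :return: The rehashed list of syllables.
--     """
--     vowels = 'aeioujwăĕŏ'
--
--     for idx, syllable in enumerate(sentence):
--         if idx > 0 and len(syllable) > 1:
--             if syllable[0].lower() in vowels and sentence[idx - 1][-1].lower() not in vowels:
--                 sentence[idx] = sentence[idx - 1][-1] + syllable
--                 sentence[idx - 1] = sentence[idx - 1][:-1]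
--
--     return sentence
-- ===== SOURCE B (Python) =====
-- def make_rehash(sentence):
--     """Single pass: each output syllable is derived from the ORIGINAL neighbours
--     (prepend previous syllable's last consonant / drop own last consonant);
--     the input list is then mutated in place via sentence[:] = result, as A does."""
--     vowels = 'aeioujwăĕŏ'
--     n = len(sentence)
--
--     def gains_front(i):
--         return (0 < i < n and len(sentence[i]) > 1
--                 and sentence[i][0].lower() in vowels
--                 and sentence[i - 1][-1].lower() not in vowels)
--
--     result = []
--     for i in range(n):
--         front = sentence[i - 1][-1] if gains_front(i) else ''
--         body = sentence[i][:-1] if gains_front(i + 1) else sentence[i]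
--         result.append(front + body)
--     sentence[:] = result
--     return sentence
-- ===== Notes on version B (the rewrite author's own statement) =====
-- stated objective: alternative
-- what changed: A rewrites the list in place left-to-right, each iteration mutating the current and the previous syllable; B is a single pure pass that derives every output syllable directly from its ORIGINAL neighbours (prepend previous last consonant / drop own last consonant) and assigns the result back with sentence[:] = result.
import Mathlib
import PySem

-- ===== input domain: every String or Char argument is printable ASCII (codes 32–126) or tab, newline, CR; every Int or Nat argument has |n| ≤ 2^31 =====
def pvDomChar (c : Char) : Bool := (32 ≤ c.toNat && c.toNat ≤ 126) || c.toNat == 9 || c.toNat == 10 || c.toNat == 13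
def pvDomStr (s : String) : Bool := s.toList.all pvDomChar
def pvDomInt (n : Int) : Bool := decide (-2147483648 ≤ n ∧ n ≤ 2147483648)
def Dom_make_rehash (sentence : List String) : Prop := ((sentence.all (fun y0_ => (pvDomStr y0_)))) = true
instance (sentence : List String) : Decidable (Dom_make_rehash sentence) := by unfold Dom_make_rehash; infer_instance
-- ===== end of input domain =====

-- B recomputes each output syllable from the ORIGINAL neighbours in one pure pass
-- (alternative decomposition, same cost); both Pythons mutate the list in place,
-- so the equivalence proved here is about the returned value (which aliases it).

-- ===== PORT A =====
def pvVowels : List Char := "aeioujwăĕŏ".toList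

-- A's loop body: one iteration of the in-place rewrite (state = the whole list)
def pvStepA (l : List String) (idx : Nat) : List String :=
  let syllable := (l.getD idx "").toList
  if 0 < idx ∧ 1 < syllable.length then
    if (syllable.headD ' ').toLower ∈ pvVowels ∧
        ((l.getD (idx - 1) "").toList.getLastD ' ').toLower ∉ pvVowels then
      let prev := (l.getD (idx - 1) "").toList
      (l.set idx (String.ofList (prev.getLastD ' ' :: syllable))).set (idx - 1)
        (String.ofList prev.dropLast)
    else l
  else l

-- literal transliteration of A: fold the loop body over the indices
def make_rehash (sentence : List String) : List String :=
  (List.range sentence.length).foldl pvStepA sentence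

-- ===== PORT B =====
-- Source B's helper gains_front(i), computed on the original list
def pvGainsFront (sentence : List String) (i : Nat) : Bool :=
  decide (0 < i) && decide (i < sentence.length) &&
  decide (1 < (sentence.getD i "").toList.length) &&
  decide (((sentence.getD i "").toList.headD ' ').toLower ∈ pvVowels) &&
  decide (((sentence.getD (i - 1) "").toList.getLastD ' ').toLower ∉ pvVowels)

def make_rehash_alt (sentence : List String) : List String :=
  (List.range sentence.length).map (fun i =>
    let front : List Char :=
      if pvGainsFront sentence i then [(sentence.getD (i - 1) "").toList.getLastD ' '] else []
    let body : List Char :=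
      if pvGainsFront sentence (i + 1) then (sentence.getD i "").toList.dropLast
      else (sentence.getD i "").toList
    String.ofList (front ++ body))

-- ===== PRECONDITION & SPEC =====
-- Pre_ excludes exactly the inputs where Python A raises IndexError: a syllable of
-- length > 1 starting with a vowel whose previous syllable is the empty string
-- (A reads sentence[idx-1][-1] there).  Python B raises on the same inputs.
def Pre_make_rehash (sentence : List String) : Prop :=
  ∀ i ∈ List.range sentence.length,
    0 < i → sentence.getD (i - 1) "" = "" →
      ¬(1 < (sentence.getD i "").toList.length ∧
        ((sentence.getD i "").toList.headD ' ').toLower ∈ pvVowels)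
instance (sentence : List String) : Decidable (Pre_make_rehash sentence) := by
  unfold Pre_make_rehash; infer_instance

def pvWitness_make_rehash : List String := ["bal", "on"]

def Spec_make_rehash (sentence : List String) (out : List String) : Prop := out = make_rehash_alt sentence
instance (sentence : List String) (out : List String) : Decidable (Spec_make_rehash sentence out) := by unfold Spec_make_rehash; infer_instance

-- ===== CLAIM (what is proved, stated in full; the proofs are below) =====
def Claim_equal_make_rehash : Prop := ∀ (sentence : List String), Dom_make_rehash sentence → Pre_make_rehash sentence → Spec_make_rehash sentence (make_rehash sentence)

-- ===== LEMMAS AND PROOFS =====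

-- the value of syllable i after it may have gained a front consonant (iteration i)
def pvGainStr (s : List String) (i : Nat) : String :=
  if pvGainsFront s i then
    String.ofList (((s.getD (i - 1) "").toList.getLastD ' ') :: (s.getD i "").toList)
  else s.getD i ""

-- the final value of syllable i (it may additionally lose its last char at iteration i+1)
def pvOut (s : List String) (i : Nat) : String :=
  if pvGainsFront s (i + 1) then String.ofList (pvGainStr s i).toList.dropLast
  else pvGainStr s i

-- state of A's list after the iterations with index < k
def pvState (s : List String) (k i : Nat) : String :=
  if i + 1 < k then pvOut s i
  else if i + 1 = k then pvGainStr s i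
  else s.getD i ""

lemma pv_set_map_range {α : Type} (f : Nat → α) (n i : Nat) (v : α) (_hi : i < n) :
    ((List.range n).map f).set i v
      = (List.range n).map (fun j => if j = i then v else f j) := by
  apply List.ext_getElem
  · simp
  · intro j h1 h2
    simp only [List.getElem_set, List.getElem_map, List.getElem_range]
    split_ifs with h h' h' <;> first | rfl | omega

lemma pv_getD_map_range (f : Nat → String) (n i : Nat) (hi : i < n) :
    ((List.range n).map f).getD i "" = f i := by
  rw [List.getD_eq_getElem?_getD]
  simp [List.getElem?_map, List.getElem?_range hi]

lemma pv_getLastD_nonempty {l : List Char} (h : l ≠ []) (a b : Char) :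
    l.getLastD a = l.getLastD b := by
  rw [List.getLastD_eq_getLast?, List.getLastD_eq_getLast?]
  cases hl : l.getLast? with
  | none => exact absurd (List.getLast?_eq_none_iff.mp hl) h
  | some c => rfl

lemma pv_gains_iff (s : List String) (i : Nat) :
    pvGainsFront s i = true ↔
      (0 < i ∧ i < s.length ∧ 1 < (s.getD i "").toList.length ∧
       ((s.getD i "").toList.headD ' ').toLower ∈ pvVowels ∧
       ((s.getD (i - 1) "").toList.getLastD ' ').toLower ∉ pvVowels) := by
  unfold pvGainsFront
  simp only [Bool.and_eq_true, decide_eq_true_eq, and_assoc]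

lemma pv_gains_len {s : List String} {i : Nat} (hg : pvGainsFront s i = true) :
    1 < (s.getD i "").toList.length := by
  unfold pvGainsFront at hg
  simp only [Bool.and_eq_true, decide_eq_true_eq] at hg
  exact hg.1.1.2

-- last char of the possibly-front-augmented syllable = last char of the original syllable
lemma pv_gainStr_last (s : List String) (i : Nat) :
    (pvGainStr s i).toList.getLastD ' ' = (s.getD i "").toList.getLastD ' ' := by
  unfold pvGainStr
  split_ifs with h
  · have hne : (s.getD i "").toList ≠ [] := by
      have := pv_gains_len h; intro he; rw [he] at this; simp at this
    simp only [String.toList_ofList]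
    rw [List.getLastD_cons]
    exact pv_getLastD_nonempty hne _ _
  · rfl

-- pointwise transition of the state when iteration k does not fire
lemma pv_state_succ_no (s : List String) (k : Nat) (hg : pvGainsFront s k = false) (j : Nat) :
    pvState s (k + 1) j = pvState s k j := by
  unfold pvState
  by_cases h1 : j + 1 < k
  · rw [if_pos (by omega), if_pos h1]
  · by_cases h2 : j + 1 = k
    · rw [if_pos (by omega), if_neg h1, if_pos h2]
      unfold pvOut
      rw [h2, hg]
      simp
    · by_cases h3 : j + 1 = k + 1
      · rw [if_neg (by omega), if_pos h3, if_neg h1, if_neg h2]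
        unfold pvGainStr
        have : j = k := by omega
        rw [this, hg]
        simp
      · rw [if_neg (by omega), if_neg h3, if_neg h1, if_neg h2]

-- pointwise transition of the state when iteration k fires
lemma pv_state_succ_yes (s : List String) (k : Nat) (hg : pvGainsFront s k = true) (j : Nat) :
    pvState s (k + 1) j =
      if j = k - 1 then String.ofList (pvGainStr s (k - 1)).toList.dropLast
      else if j = k then pvGainStr s k
      else pvState s k j := by
  have hk0 : 0 < k := by
    rw [pv_gains_iff] at hg
    exact hg.1
  unfold pvState
  by_cases hj1 : j = k - 1
  · subst hj1
    rw [if_pos (by omega), if_pos rfl]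
    unfold pvOut
    rw [show k - 1 + 1 = k from by omega, hg]
    simp
  · by_cases hj2 : j = k
    · subst hj2
      rw [if_neg (by omega), if_pos rfl, if_neg hj1, if_pos rfl]
    · rw [if_neg hj1, if_neg hj2]
      by_cases h1 : j + 1 < k
      · rw [if_pos (by omega), if_pos h1]
      · rw [if_neg (by omega), if_neg (by omega), if_neg (by omega), if_neg (by omega)]

-- one step of A's loop advances the state from k to k + 1
lemma pv_step (s : List String) (k : Nat) (hk : k < s.length) :
    pvStepA ((List.range s.length).map (pvState s k)) k
      = (List.range s.length).map (pvState s (k + 1)) := by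
  have hkk : ((List.range s.length).map (pvState s k)).getD k "" = s.getD k "" := by
    rw [pv_getD_map_range _ _ _ hk]
    unfold pvState
    rw [if_neg (by omega), if_neg (by omega)]
  unfold pvStepA
  simp only [hkk]
  by_cases hk0 : 0 < k
  · have hkm : k - 1 < s.length := by omega
    have hprev : ((List.range s.length).map (pvState s k)).getD (k - 1) "" = pvGainStr s (k - 1) := by
      rw [pv_getD_map_range _ _ _ hkm]
      unfold pvState
      rw [if_neg (by omega), if_pos (by omega)]
    rw [hprev]
    by_cases hlen : 1 < (s.getD k "").toList.length
    · rw [if_pos ⟨hk0, hlen⟩]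
      by_cases hcond : ((s.getD k "").toList.headD ' ').toLower ∈ pvVowels ∧
          ((pvGainStr s (k - 1)).toList.getLastD ' ').toLower ∉ pvVowels
      · have hg : pvGainsFront s k = true := by
          unfold pvGainsFront
          rw [pv_gainStr_last] at hcond
          simp only [Bool.and_eq_true, decide_eq_true_eq]
          exact ⟨⟨⟨⟨hk0, hk⟩, hlen⟩, hcond.1⟩, hcond.2⟩
        rw [if_pos hcond]
        rw [pv_set_map_range _ _ k _ hk, pv_set_map_range _ _ (k - 1) _ hkm]
        apply List.map_congr_left
        intro j hj
        rw [List.mem_range] at hj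
        rw [pv_state_succ_yes s k hg j]
        by_cases hj1 : j = k - 1
        · rw [if_pos hj1, if_pos hj1]
        · rw [if_neg hj1, if_neg hj1]
          by_cases hj2 : j = k
          · rw [if_pos hj2, if_pos hj2]
            subst hj2
            rw [pv_gainStr_last]
            unfold pvGainStr
            rw [if_pos hg]
          · rw [if_neg hj2, if_neg hj2]
      · have hg : pvGainsFront s k = false := by
          rw [Bool.eq_false_iff]
          intro h
          rw [pv_gains_iff] at h
          rw [pv_gainStr_last] at hcond
          exact hcond ⟨h.2.2.2.1, h.2.2.2.2⟩
        rw [if_neg hcond]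
        apply List.map_congr_left
        intro j hj
        rw [pv_state_succ_no s k hg j]
    · rw [if_neg (by exact fun h => hlen h.2)]
      have hg : pvGainsFront s k = false := by
        rw [Bool.eq_false_iff]
        intro h
        rw [pv_gains_iff] at h
        exact hlen h.2.2.1
      apply List.map_congr_left
      intro j hj
      rw [pv_state_succ_no s k hg j]
  · have hk0' : k = 0 := by omega
    subst hk0'
    rw [if_neg (by simp)]
    have hg : pvGainsFront s 0 = false := by
      rw [Bool.eq_false_iff]
      intro h
      rw [pv_gains_iff] at h
      omega
    apply List.map_congr_left
    intro j hj
    rw [pv_state_succ_no s 0 hg j]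

lemma pv_loop (s : List String) : ∀ (m k : Nat), k + m = s.length →
    (List.range' k m).foldl pvStepA ((List.range s.length).map (pvState s k))
      = (List.range s.length).map (pvState s s.length) := by
  intro m
  induction m with
  | zero =>
    intro k hk
    simp only [List.range'_zero, List.foldl_nil]
    rw [← hk]
    simp
  | succ m ih =>
    intro k hk
    rw [List.range'_succ, List.foldl_cons, pv_step s k (by omega)]
    exact ih (k + 1) (by omega)

lemma pv_init (s : List String) : (List.range s.length).map (pvState s 0) = s := by
  apply List.ext_getElem
  · simp
  · intro j h1 h2
    simp only [List.getElem_map, List.getElem_range]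
    unfold pvState
    simp [List.getD_eq_getElem?_getD, h2]

lemma pv_final (s : List String) :
    (List.range s.length).map (pvState s s.length) = make_rehash_alt s := by
  unfold make_rehash_alt
  apply List.map_congr_left
  intro i hi
  rw [List.mem_range] at hi
  unfold pvState
  by_cases h : i + 1 < s.length
  · rw [if_pos h]
    unfold pvOut pvGainStr
    by_cases hg : pvGainsFront s i
    · have hne : (s.getD i "").toList ≠ [] := by
        have := pv_gains_len hg; intro he; rw [he] at this; simp at this
      by_cases hg' : pvGainsFront s (i + 1)
      · simp only [hg, hg', if_true, String.toList_ofList]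
        rw [List.dropLast_cons_of_ne_nil hne]
        simp
      · simp [hg, hg']
    · by_cases hg' : pvGainsFront s (i + 1) <;> simp [hg, hg']
  · have h2 : i + 1 = s.length := by omega
    rw [if_neg h, if_pos h2]
    unfold pvGainStr
    have hgn : pvGainsFront s (i + 1) = false := by
      rw [Bool.eq_false_iff]
      intro hx
      rw [pv_gains_iff] at hx
      omega
    rw [hgn]
    by_cases hg : pvGainsFront s i <;> simp [hg]

-- ===== VERDICT (by name: the statement is the Claim_ definition above) =====
theorem make_rehash_spec : Claim_equal_make_rehash := by
  intro s _ _
  unfold Spec_make_rehash make_rehash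
  rw [List.range_eq_range']
  calc (List.range' 0 s.length).foldl pvStepA s
      = (List.range' 0 s.length).foldl pvStepA ((List.range s.length).map (pvState s 0)) := by
        rw [pv_init]
    _ = (List.range s.length).map (pvState s s.length) := pv_loop s s.length 0 (by omega)
    _ = make_rehash_alt s := pv_final s
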